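-- pv_equiv track=rewrite | github.com/xoxoqkr/SY_Hotel | Basic_Func.py | InputCalculator
-- ===== SOURCE A (Python) =====
-- def InputCalculator(trip_infos, customer_names):
--     D = []
--     S = []
--     P = []
--     for customer_name in customer_names:
--         tem = []
--         for trip_info in trip_infos:
--             if customer_name in trip_info[1]:
--                 tem.append(trip_info[0])
--         D.append(tem)
--     for trip_info in trip_infos:
--         S.append(trip_info[2])
--         P.append(trip_info[3])
--     return D,S,P
-- ===== SOURCE B (Python) =====
-- def InputCalculator(trip_infos, customer_names):
--     index = {}
--     for trip_info in trip_infos: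
--         for name in dict.fromkeys(trip_info[1]):
--             index.setdefault(name, []).append(trip_info[0])
--     D = [index.get(name, []) for name in customer_names]
--     S = [trip_info[2] for trip_info in trip_infos]
--     P = [trip_info[3] for trip_info in trip_infos]
--     return D, S, P
-- ===== Notes on version B (the rewrite author's own statement) =====
-- stated objective: faster
-- what changed: Instead of scanning all trips once per customer, B builds a name->trip-id dictionary in a single pass over the trips and then answers each customer by one lookup.
import Mathlib
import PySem

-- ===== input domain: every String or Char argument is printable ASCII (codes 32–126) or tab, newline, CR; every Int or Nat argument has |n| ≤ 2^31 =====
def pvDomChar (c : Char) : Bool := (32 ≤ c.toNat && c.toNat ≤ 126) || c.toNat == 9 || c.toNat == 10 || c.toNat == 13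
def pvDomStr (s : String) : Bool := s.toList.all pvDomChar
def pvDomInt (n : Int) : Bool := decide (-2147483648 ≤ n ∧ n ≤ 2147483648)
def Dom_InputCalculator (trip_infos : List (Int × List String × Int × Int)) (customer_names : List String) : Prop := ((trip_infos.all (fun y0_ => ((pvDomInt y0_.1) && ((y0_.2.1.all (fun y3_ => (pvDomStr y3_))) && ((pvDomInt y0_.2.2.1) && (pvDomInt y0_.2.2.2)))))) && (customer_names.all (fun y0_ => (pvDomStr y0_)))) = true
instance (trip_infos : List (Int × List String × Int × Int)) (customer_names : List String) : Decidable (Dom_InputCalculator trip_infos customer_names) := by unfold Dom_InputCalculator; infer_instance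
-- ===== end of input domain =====

-- B builds a name -> trip-id dictionary in one pass over the trips, then answers each
-- customer with one lookup (instead of A's rescan of all trips per customer).

-- ===== PORT A =====
def InputCalculator (trip_infos : List (Int × List String × Int × Int)) (customer_names : List String) : List (List Int) × List Int × List Int :=
  let D := customer_names.foldl (fun D c =>
    D ++ [trip_infos.foldl (fun tem t => if c ∈ t.2.1 then tem ++ [t.1] else tem) []]) []
  let S := trip_infos.foldl (fun S t => S ++ [t.2.2.1]) []
  let P := trip_infos.foldl (fun P t => P ++ [t.2.2.2]) []
  (D, S, P)

-- ===== PORT B =====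
def InputCalculator_alt (trip_infos : List (Int × List String × Int × Int)) (customer_names : List String) : List (List Int) × List Int × List Int :=
  let index := trip_infos.foldl (fun d t =>
    (PySem.List.dedup t.2.1).foldl (fun d name => d.modify name [] (fun l => l ++ [t.1])) d)
    PySem.Dict.empty
  (customer_names.map (fun name => index.getD name []),
   trip_infos.map (fun t => t.2.2.1),
   trip_infos.map (fun t => t.2.2.2))

-- ===== PRECONDITION & SPEC =====
def Spec_InputCalculator (trip_infos : List (Int × List String × Int × Int)) (customer_names : List String) (out : List (List Int) × List Int × List Int) : Prop := out = InputCalculator_alt trip_infos customer_names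
instance (trip_infos : List (Int × List String × Int × Int)) (customer_names : List String) (out : List (List Int) × List Int × List Int) : Decidable (Spec_InputCalculator trip_infos customer_names out) := by unfold Spec_InputCalculator; infer_instance

-- ===== CLAIM (what is proved, stated in full; the proofs are below) =====
def Claim_equal_InputCalculator : Prop := ∀ (trip_infos : List (Int × List String × Int × Int)) (customer_names : List String), Dom_InputCalculator trip_infos customer_names → Spec_InputCalculator trip_infos customer_names (InputCalculator trip_infos customer_names)

-- ===== LEMMAS AND PROOFS =====

-- In a Nodup list, filtering for equality with c yields [c] or [].
lemma filter_beq_of_nodup (s : List String) (hs : s.Nodup) (c : String) :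
    s.filter (fun n => n == c) = if c ∈ s then [c] else [] := by
  induction s with
  | nil => simp
  | cons a s ih =>
    rcases List.nodup_cons.mp hs with ⟨ha, hs'⟩
    by_cases hac : a = c
    · subst hac
      simp [ih hs', ha]
    · simp [hac, ih hs', Ne.symm hac]

-- One trip's inner loop: appending the trip id under every (distinct) name.
lemma inner_getD (s : List String) (hs : s.Nodup) (d : PySem.Dict String (List Int))
    (id : Int) (c : String) :
    ((s.foldl (fun d name => d.modify name [] (fun l => l ++ [id])) d).getD c []) =
      d.getD c [] ++ (if c ∈ s then [id] else []) := by
  have h : s.foldl (fun d name => d.modify name [] (fun l => l ++ [id])) d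
      = ((s.map (fun n => (n, id))).foldl (fun d p => d.modify p.1 [] (fun l => l ++ [p.2])) d) := by
    rw [List.foldl_map]
  rw [h, PySem.Dict.getD_foldl_modify_append]
  congr 1
  rw [List.filter_map]
  have : (fun p => p.1 == c) ∘ (fun n : String => (n, id)) = (fun n => n == c) := rfl
  rw [this, filter_beq_of_nodup s hs c]
  by_cases hc : c ∈ s <;> simp [hc]

-- The whole dictionary-building loop, characterised per key.
lemma index_getD (trips : List (Int × List String × Int × Int))
    (d : PySem.Dict String (List Int)) (c : String) :
    ((trips.foldl (fun d t =>
        (PySem.List.dedup t.2.1).foldl (fun d name => d.modify name [] (fun l => l ++ [t.1])) d) d).getD c []) =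
      d.getD c [] ++ trips.flatMap (fun t => if c ∈ t.2.1 then [t.1] else []) := by
  induction trips generalizing d with
  | nil => simp
  | cons t trips ih =>
    rw [List.foldl_cons, ih, List.flatMap_cons, ← List.append_assoc]
    congr 1
    rw [inner_getD _ (PySem.List.nodup_dedup _) d t.1 c]
    simp

-- A's inner scan over all trips, per customer.
lemma a_inner (trips : List (Int × List String × Int × Int)) (acc : List Int) (c : String) :
    trips.foldl (fun tem t => if c ∈ t.2.1 then tem ++ [t.1] else tem) acc =
      acc ++ trips.flatMap (fun t => if c ∈ t.2.1 then [t.1] else []) := by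
  induction trips generalizing acc with
  | nil => simp
  | cons t trips ih =>
    rw [List.foldl_cons, List.flatMap_cons]
    by_cases hc : c ∈ t.2.1 <;> simp [hc, ih]

-- ===== VERDICT (by name: the statement is the Claim_ definition above) =====
theorem InputCalculator_spec : Claim_equal_InputCalculator := by
  intro trips names hdom
  clear hdom
  unfold Spec_InputCalculator InputCalculator InputCalculator_alt
  refine Prod.ext ?_ (Prod.ext ?_ ?_)
  · simp only [PySem.List.foldl_append_singleton_eq_map]
    apply List.map_congr_left
    intro c _
    rw [a_inner trips [] c, index_getD trips PySem.Dict.empty c]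
    simp
  · rw [PySem.List.foldl_append_singleton_eq_map]; induction trips <;> simp_all
  · rw [PySem.List.foldl_append_singleton_eq_map]; induction trips <;> simp_all
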